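-- pv_equiv track=rewrite | github.com/soupday/CCiC-Blender-Pipeline-Plugin | cc.py | safe_export_name
-- ===== SOURCE A (Python) =====
-- INVALID_EXPORT_CHARACTERS: str = "`¬!\"£$%^&*()+-=[]{}:@~;'#<>?,./\| "
--
-- DIGITS: str = "0123456789"
--
-- def safe_export_name(name, is_material = False):
--     for char in INVALID_EXPORT_CHARACTERS:
--         if char in name:
--             name = name.replace(char, "_")
--     if is_material:
--         if name[0] in DIGITS:
--             name = f"_{name}"
--     return name
-- ===== SOURCE B (Python) =====
-- INVALID_EXPORT_CHARACTERS: str = "`¬!\"£$%^&*()+-=[]{}:@~;'#<>?,./\| "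
--
-- DIGITS: str = "0123456789"
--
-- _INVALID_SET = frozenset(INVALID_EXPORT_CHARACTERS)
--
-- def safe_export_name(name, is_material = False):
--     out = "".join("_" if c in _INVALID_SET else c for c in name)
--     if is_material and out[0] in DIGITS:
--         out = "_" + out
--     return out
-- ===== Notes on version B (the rewrite author's own statement) =====
-- stated objective: idiomatic
-- what changed: One linear pass over the input string emitting an underscore for characters in a frozenset of the invalid alphabet, joined once, instead of one whole-string str.replace scan per invalid character.
import Mathlib
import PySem

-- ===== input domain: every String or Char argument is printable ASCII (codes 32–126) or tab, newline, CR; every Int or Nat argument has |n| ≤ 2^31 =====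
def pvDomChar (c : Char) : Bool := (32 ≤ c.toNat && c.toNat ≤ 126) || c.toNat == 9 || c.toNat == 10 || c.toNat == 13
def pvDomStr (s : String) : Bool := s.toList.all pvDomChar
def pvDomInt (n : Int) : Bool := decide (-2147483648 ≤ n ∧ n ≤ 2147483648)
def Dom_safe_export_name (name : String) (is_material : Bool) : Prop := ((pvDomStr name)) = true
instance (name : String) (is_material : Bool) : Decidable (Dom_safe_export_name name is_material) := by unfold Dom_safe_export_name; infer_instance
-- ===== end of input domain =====

-- B replaces A's one whole-string str.replace scan per invalid character by a single
-- pass over name (frozenset membership), joined into the result; objective: idiomatic single pass.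

def INVALID_EXPORT_CHARACTERS : String := "`¬!\"£$%^&*()+-=[]{}:@~;'#<>?,./\\| "

def DIGITS : String := "0123456789"

-- ===== PORT A =====
-- for char in INVALID_EXPORT_CHARACTERS: if char in name: name = name.replace(char, "_")
-- then the is_material branch; name[0] → PySem.Str.pyGet? (none = IndexError, excluded by Pre_);
-- f"_{name}" → String.ofList ('_' :: name.toList) (exact: one-char prefix concatenation).
def safe_export_name (name : String) (is_material : Bool) : String :=
  let name := INVALID_EXPORT_CHARACTERS.toList.foldl
    (fun n char =>
      if PySem.Str.isIn (String.ofList [char]) n then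
        PySem.Str.replace n (String.ofList [char]) "_"
      else n) name
  if is_material then
    match PySem.Str.pyGet? name 0 with
    | some c => if PySem.Str.isIn (String.ofList [c]) DIGITS then String.ofList ('_' :: name.toList) else name
    | none => name   -- IndexError in Python: excluded by Pre_safe_export_name
  else name

-- ===== PORT B =====
-- out = "".join("_" if c in _INVALID_SET else c for c in name); frozenset → PySem.Set
def pvInvalidSet : PySem.Set Char := PySem.Set.ofList INVALID_EXPORT_CHARACTERS.toList

def safe_export_name_alt (name : String) (is_material : Bool) : String :=
  let out := String.ofList (name.toList.map (fun c => if pvInvalidSet.contains c then '_' else c))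
  if is_material then
    match PySem.Str.pyGet? out 0 with
    | some c => if PySem.Str.isIn (String.ofList [c]) DIGITS then String.ofList ('_' :: out.toList) else out
    | none => out   -- IndexError in Python: excluded by Pre_safe_export_name
  else out

-- ===== PRECONDITION & SPEC =====
-- Pre_ excludes only the empty name with is_material = True, where both A and B raise IndexError on name[0].
def Pre_safe_export_name (name : String) (is_material : Bool) : Prop :=
  is_material = true → name ≠ ""

instance (name : String) (is_material : Bool) : Decidable (Pre_safe_export_name name is_material) := by
  unfold Pre_safe_export_name; infer_instance

def pvWitness_safe_export_name : String × Bool := ("9a b.c", true)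

def Spec_safe_export_name (name : String) (is_material : Bool) (out : String) : Prop := out = safe_export_name_alt name is_material
instance (name : String) (is_material : Bool) (out : String) : Decidable (Spec_safe_export_name name is_material out) := by unfold Spec_safe_export_name; infer_instance

-- ===== CLAIM (what is proved, stated in full; the proofs are below) =====
def Claim_equal_safe_export_name : Prop := ∀ (name : String) (is_material : Bool), Dom_safe_export_name name is_material → Pre_safe_export_name name is_material → Spec_safe_export_name name is_material (safe_export_name name is_material)

-- ===== LEMMAS AND PROOFS =====

-- single-character str.replace is a character map (fuel-indexed worker of PySem.Chars.replace)
lemma pv_go_single (c : Char) : ∀ (fuel : Nat) (l acc : List Char), l.length ≤ fuel →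
    PySem.Chars.replace.go [c] ['_'] fuel l acc
      = acc.reverse ++ l.map (fun x => if x = c then '_' else x) := by
  intro fuel
  induction fuel with
  | zero => intro l acc h; simp at h; subst h; simp [PySem.Chars.replace.go]
  | succ n ih =>
    intro l acc h
    cases l with
    | nil => simp [PySem.Chars.replace.go]
    | cons a t =>
      simp only [PySem.Chars.replace.go, List.isPrefixOf]
      by_cases hac : c = a
      · subst hac
        simp only [List.length_cons] at h
        simp [ih t _ (by omega)]
      · simp only [List.length_cons] at h
        have hba : (c == a) = false := by simp [hac]
        simp [hba, ih t _ (by omega), Ne.symm hac]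

lemma pv_replace_single (c : Char) (l : List Char) :
    PySem.Chars.replace l [c] ['_'] = l.map (fun x => if x = c then '_' else x) := by
  simpa using pv_go_single c l.length l []

-- one step of A's loop, at the character-list level
lemma pv_stepA (c : Char) (s : String) :
    (if PySem.Str.isIn (String.ofList [c]) s then
        PySem.Str.replace s (String.ofList [c]) "_" else s).toList
      = s.toList.map (fun x => if x = c then '_' else x) := by
  split_ifs with h
  · simp [PySem.Str.toList_replace, pv_replace_single]
  · have hni : c ∉ s.toList := by
      have := (PySem.Chars.isIn_eq_false_iff (sub := [c]) (s := s.toList)).mp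
        (by simpa [PySem.Str.isIn_eq] using eq_false_of_ne_true h)
      simpa [List.singleton_infix_iff] using this
    symm
    refine Eq.trans ?_ (List.map_id _)
    refine List.map_congr_left (fun x hx => if_neg (fun hxc : x = c => hni (hxc ▸ hx)))

-- A's whole loop is a single character map, provided '_' is not an invalid character
lemma pv_foldA (inv : List Char) : ∀ (s : String), '_' ∉ inv →
    (inv.foldl (fun n char =>
        if PySem.Str.isIn (String.ofList [char]) n then
          PySem.Str.replace n (String.ofList [char]) "_" else n) s).toList
      = s.toList.map (fun x => if x ∈ inv then '_' else x) := by
  induction inv with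
  | nil => intro s _; simp
  | cons c rest ih =>
    intro s hu
    have hu' : '_' ∉ rest := fun h => hu (List.mem_cons_of_mem _ h)
    have huc : '_' ≠ c := fun h => hu (h ▸ List.mem_cons_self)
    rw [List.foldl_cons, ih _ hu']
    rw [pv_stepA, List.map_map]
    refine List.map_congr_left (fun x _ => ?_)
    by_cases hxc : x = c
    · simp [hxc, Function.comp]
    · by_cases hxr : x ∈ rest <;> simp [Function.comp, hxc, hxr]

-- the two sanitized strings coincide
lemma pv_sanitized (name : String) :
    (INVALID_EXPORT_CHARACTERS.toList.foldl
      (fun n char =>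
        if PySem.Str.isIn (String.ofList [char]) n then
          PySem.Str.replace n (String.ofList [char]) "_" else n) name)
    = String.ofList (name.toList.map (fun c => if pvInvalidSet.contains c then '_' else c)) := by
  apply String.toList_inj.mp
  rw [pv_foldA _ _ (by decide)]
  simp only [String.toList_ofList]
  refine List.map_congr_left (fun x _ => ?_)
  have hmem : x ∈ pvInvalidSet ↔ x ∈ INVALID_EXPORT_CHARACTERS.toList := by
    rw [pvInvalidSet]; exact PySem.Set.mem_ofList (y := x) (xs := INVALID_EXPORT_CHARACTERS.toList)
  by_cases hx : x ∈ INVALID_EXPORT_CHARACTERS.toList <;> simp [hmem, hx]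

-- ===== VERDICT (by name: the statement is the Claim_ definition above) =====
theorem safe_export_name_spec : Claim_equal_safe_export_name := by
  intro name is_material _ _
  unfold Spec_safe_export_name safe_export_name safe_export_name_alt
  rw [pv_sanitized]
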